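-- pv_equiv track=rewrite | github.com/joaotavora/rassumfrassum | src/rassumfrassum/main.py | parse_server_commands
-- ===== SOURCE A (Python) =====
-- def parse_server_commands(
--     argv: list[str],
-- ) -> tuple[list[str], list[list[str]], list[list[str]]]:
--     """
--     Split argv on '--' and '---' separators.
--     Returns (rass_args, server_commands, relay_server_commands)
--
--     '--' separates regular server commands.
--     '---' separates relay server commands.
--     """
--     if "--" not in argv and "---" not in argv:
--         return argv, [], []
--
--     # Find first separator (either -- or ---)
--     first_sep = None
--     for i, arg in enumerate(argv):
--         if arg in ("--", "---"):
--             first_sep = i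
--             break
--
--     if first_sep is None:
--         return argv, [], []
--
--     # Everything before first separator is rass options
--     rass_args = argv[:first_sep]
--
--     # Walk through remaining args, splitting on separators
--     server_commands: list[list[str]] = []
--     relay_server_commands: list[list[str]] = []
--     current: list[str] = []
--     is_relay = False
--
--     for arg in argv[first_sep:]:
--         if arg in ("--", "---"):
--             if current:
--                 (relay_server_commands if is_relay else server_commands).append(current)
--                 current = []
--             is_relay = (arg == "---")
--         else:
--             current.append(arg)
--
--     if current:
--         (relay_server_commands if is_relay else server_commands).append(current)
--
--     return rass_args, server_commands, relay_server_commands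
-- ===== SOURCE B (Python) =====
-- def parse_server_commands(
--     argv: list[str],
-- ) -> tuple[list[str], list[list[str]], list[list[str]]]:
--     """
--     Split argv on '--' and '---' separators.
--     Returns (rass_args, server_commands, relay_server_commands)
--
--     Single reverse pass: accumulate the tokens to the right of the cursor
--     (in reversed order); each separator closes the accumulated group and
--     tags it with that separator; finally partition the tagged groups.
--     """
--     pre_rev: list[str] = []
--     groups_rev: list[tuple[str, list[str]]] = []
--     for a in reversed(argv):
--         if a in ("--", "---"):
--             if pre_rev:
--                 groups_rev.append((a, pre_rev[::-1]))
--             pre_rev = []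
--         else:
--             pre_rev.append(a)
--     server_commands = [g for tok, g in reversed(groups_rev) if tok == "--"]
--     relay_server_commands = [g for tok, g in reversed(groups_rev) if tok == "---"]
--     return pre_rev[::-1], server_commands, relay_server_commands
-- ===== Notes on version B (the rewrite author's own statement) =====
-- stated objective: alternative
-- what changed: Replaces A's find-first-separator + forward streaming loop with an is_relay flag and two target lists by a single reverse pass that closes each group on the separator immediately before it, tagging it with that separator, followed by a partition of the tagged group list by tag.
import Mathlib
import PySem

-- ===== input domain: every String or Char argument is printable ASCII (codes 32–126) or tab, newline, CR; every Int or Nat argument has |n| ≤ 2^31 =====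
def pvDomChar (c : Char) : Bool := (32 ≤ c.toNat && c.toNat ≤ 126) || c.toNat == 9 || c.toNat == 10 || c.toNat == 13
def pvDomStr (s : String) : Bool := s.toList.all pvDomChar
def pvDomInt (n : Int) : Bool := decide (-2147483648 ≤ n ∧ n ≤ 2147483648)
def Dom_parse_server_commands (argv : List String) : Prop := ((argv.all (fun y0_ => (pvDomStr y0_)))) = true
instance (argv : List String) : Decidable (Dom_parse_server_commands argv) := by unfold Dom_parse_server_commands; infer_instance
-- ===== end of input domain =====

-- B is an alternative decomposition of the same O(n) task: one reverse pass that closes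
-- each group on its immediately preceding separator and tags it, then a partition by tag.

-- ===== PORT A =====
-- the 'for i, arg in enumerate(argv): if arg in ("--","---"): first_sep = i; break' loop
def pvFindSepA : List (Int × String) → Option Int
  | [] => none
  | (i, a) :: rest => if a == "--" || a == "---" then some i else pvFindSepA rest

-- body of 'for arg in argv[first_sep:]' with state (server_commands, relay_server_commands, current, is_relay)
def pvStepA (st : List (List String) × List (List String) × List String × Bool) (arg : String) :
    List (List String) × List (List String) × List String × Bool :=
  let (sc, rc, cur, rel) := st
  if arg == "--" || arg == "---" then
    if cur ≠ [] then
      if rel then (sc, rc ++ [cur], [], arg == "---") else (sc ++ [cur], rc, [], arg == "---")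
    else (sc, rc, [], arg == "---")
  else (sc, rc, cur ++ [arg], rel)

def parse_server_commands (argv : List String) : List String × List (List String) × List (List String) :=
  if ¬ argv.contains "--" ∧ ¬ argv.contains "---" then (argv, [], [])
  else
    match pvFindSepA (PySem.List.enumerate argv 0) with
    | none => (argv, [], [])
    | some first_sep =>
      let rass_args := PySem.List.slice argv none (some first_sep)
      let (sc, rc, cur, rel) := (PySem.List.slice argv (some first_sep) none).foldl pvStepA ([], [], [], false)
      let (sc, rc) := if cur ≠ [] then (if rel then (sc, rc ++ [cur]) else (sc ++ [cur], rc)) else (sc, rc)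
      (rass_args, sc, rc)

-- ===== PORT B =====
-- body of 'for a in reversed(argv)' with state (pre_rev, groups_rev)
def pvStepB (st : List String × List (String × List String)) (a : String) :
    List String × List (String × List String) :=
  let (pre_rev, groups_rev) := st
  if a == "--" || a == "---" then
    ([], if pre_rev ≠ [] then groups_rev ++ [(a, pre_rev.reverse)] else groups_rev)
  else (pre_rev ++ [a], groups_rev)

def parse_server_commands_alt (argv : List String) : List String × List (List String) × List (List String) :=
  let (pre_rev, groups_rev) := argv.reverse.foldl pvStepB ([], [])
  let server_commands := (groups_rev.reverse.filter (fun p => p.1 == "--")).map (·.2)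
  let relay_server_commands := (groups_rev.reverse.filter (fun p => p.1 == "---")).map (·.2)
  (pre_rev.reverse, server_commands, relay_server_commands)

-- ===== PRECONDITION & SPEC =====
def Spec_parse_server_commands (argv : List String) (out : List String × List (List String) × List (List String)) : Prop := out = parse_server_commands_alt argv
instance (argv : List String) (out : List String × List (List String) × List (List String)) : Decidable (Spec_parse_server_commands argv out) := by unfold Spec_parse_server_commands; infer_instance

-- ===== CLAIM (what is proved, stated in full; the proofs are below) =====
def Claim_equal_parse_server_commands : Prop := ∀ (argv : List String), Dom_parse_server_commands argv → Spec_parse_server_commands argv (parse_server_commands argv)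

-- ===== LEMMAS AND PROOFS =====

-- arg in ("--", "---")
def pvIsSep (a : String) : Bool := a == "--" || a == "---"
-- clean left-to-right description of B's reverse pass: (prefix before first separator,
-- tagged nonempty groups, each tagged by the separator immediately before it)
def pvG : List String → List String × List (String × List String)
  | [] => ([], [])
  | a :: xs =>
    let (pre, gs) := pvG xs
    if pvIsSep a then ([], if pre ≠ [] then (a, pre) :: gs else gs)
    else (a :: pre, gs)

def pvSel (tok : String) (gs : List (String × List String)) : List (List String) :=
  (gs.filter (fun p => p.1 == tok)).map (·.2)

-- the final 'if current: (...).append(current)' of A, as a function of the loop state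
def pvFinish (st : List (List String) × List (List String) × List String × Bool) :
    List (List String) × List (List String) :=
  let (sc, rc, cur, rel) := st
  if cur ≠ [] then (if rel then (sc, rc ++ [cur]) else (sc ++ [cur], rc)) else (sc, rc)

-- groups of xs when the group in progress is cur (tagged by flag rel)
def pvTagged (rel : Bool) (cur : List String) (xs : List String) : List (String × List String) :=
  let (pre, gs) := pvG xs
  if cur ++ pre ≠ [] then ((if rel then "---" else "--"), cur ++ pre) :: gs else gs

theorem pvIsSep_elim {a : String} (h : pvIsSep a = true) : a = "--" ∨ a = "---" := by
  simp [pvIsSep] at h; exact h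

theorem pvFoldB_eq_pvG (xs : List String) :
    xs.reverse.foldl pvStepB ([], []) = ((pvG xs).1.reverse, (pvG xs).2.reverse) := by
  rw [List.foldl_reverse]
  induction xs with
  | nil => simp [pvG]
  | cons a xs ih =>
    rw [List.foldr_cons, ih]
    by_cases h : pvIsSep a = true
    · have hb : (a == "--" || a == "---") = true := by
        rcases pvIsSep_elim h with rfl | rfl <;> simp
      by_cases hp : (pvG xs).1 = [] <;>
        simp [pvStepB, pvG, h, hb, hp]
    · have hb : (a == "--" || a == "---") = false := by
        simp [pvIsSep] at h; simp [h]
      simp [pvStepB, pvG, h, hb]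

theorem pvB_char (argv : List String) :
    parse_server_commands_alt argv = ((pvG argv).1, pvSel "--" (pvG argv).2, pvSel "---" (pvG argv).2) := by
  simp only [parse_server_commands_alt]
  rw [pvFoldB_eq_pvG]
  simp [pvSel]

theorem pvFoldA (xs : List String) : ∀ (sc rc : List (List String)) (cur : List String) (rel : Bool),
    pvFinish (xs.foldl pvStepA (sc, rc, cur, rel))
      = (sc ++ pvSel "--" (pvTagged rel cur xs), rc ++ pvSel "---" (pvTagged rel cur xs)) := by
  induction xs with
  | nil =>
    intro sc rc cur rel
    by_cases hc : cur = []
    · cases rel <;> simp [pvFinish, pvTagged, pvSel, pvG, hc]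
    · cases rel <;> simp [pvFinish, pvTagged, pvSel, pvG, hc]
  | cons a xs ih =>
    intro sc rc cur rel
    by_cases h : pvIsSep a = true
    · have ha := pvIsSep_elim h
      have hb : (a == "--" || a == "---") = true := by
        rcases ha with rfl | rfl <;> simp
      by_cases hc : cur = []
      · subst hc
        simp only [List.foldl_cons, pvStepA, hb, if_pos, ne_eq, not_true_eq_false, if_false]
        simp only [ih]
        rcases ha with rfl | rfl <;> simp [pvTagged, pvG, pvIsSep]
      · cases rel
        · simp only [List.foldl_cons, pvStepA, hb]
          simp only [if_pos, ne_eq, hc, not_false_eq_true, Bool.false_eq_true, ite_false]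
          simp only [ih]
          rcases ha with rfl | rfl <;>
            simp [pvTagged, pvG, pvIsSep, pvSel, List.append_assoc, hc]
        · simp only [List.foldl_cons, pvStepA, hb]
          simp only [if_pos, ne_eq, hc, not_false_eq_true]
          simp only [ih]
          rcases ha with rfl | rfl <;>
            simp [pvTagged, pvG, pvIsSep, pvSel, List.append_assoc, hc]
    · have hb : (a == "--" || a == "---") = false := by
        simp [pvIsSep] at h; simp [h]
      simp only [List.foldl_cons, pvStepA, hb, Bool.false_eq_true, if_false]
      simp only [ih]
      have : pvTagged rel cur (a :: xs) = pvTagged rel (cur ++ [a]) xs := by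
        simp [pvTagged, pvG, h, List.append_assoc]
      rw [this]

theorem pvFind_some (xs : List String) (h : xs.any pvIsSep = true) : ∀ (s : Int),
    pvFindSepA (PySem.List.enumerate xs s)
      = some (s + ((xs.takeWhile (fun a => !pvIsSep a)).length : Int)) := by
  induction xs with
  | nil => simp at h
  | cons a xs ih =>
    intro s
    by_cases ha : pvIsSep a = true
    · have hb : (a == "--" || a == "---") = true := by
        rcases pvIsSep_elim ha with rfl | rfl <;> simp
      simp [PySem.List.enumerate_cons, pvFindSepA, hb, ha]
    · have hb : (a == "--" || a == "---") = false := by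
        simp [pvIsSep] at ha; simp [ha]
      have hx : xs.any pvIsSep = true := by
        simp [List.any_cons, ha] at h ⊢; simpa using h
      simp only [PySem.List.enumerate_cons, pvFindSepA, hb, Bool.false_eq_true, if_false]
      rw [ih hx (s + 1)]
      simp [ha]
      ring

theorem pvG_nonsep (xs : List String) (h : ∀ a ∈ xs, pvIsSep a = false) : pvG xs = (xs, []) := by
  induction xs with
  | nil => simp [pvG]
  | cons a xs ih =>
    have ha := h a (by simp)
    have := ih (fun b hb => h b (by simp [hb]))
    simp [pvG, this, ha]

theorem pvG_append_nonsep (pre : List String) (ys : List String)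
    (h : ∀ a ∈ pre, pvIsSep a = false) :
    pvG (pre ++ ys) = (pre ++ (pvG ys).1, (pvG ys).2) := by
  induction pre with
  | nil => simp
  | cons a pre ih =>
    have ha := h a (by simp)
    have := ih (fun b hb => h b (by simp [hb]))
    simp [pvG, this, ha]

theorem pvDropWhile_sep (xs : List String) (h : xs.any pvIsSep = true) :
    ∃ a rest, xs.dropWhile (fun b => !pvIsSep b) = a :: rest ∧ pvIsSep a = true := by
  induction xs with
  | nil => simp at h
  | cons a xs ih =>
    by_cases ha : pvIsSep a = true
    · exact ⟨a, xs, by simp [ha], ha⟩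
    · have hx : xs.any pvIsSep = true := by
        simp [List.any_cons, ha] at h ⊢; simpa using h
      obtain ⟨b, rest, hd, hb⟩ := ih hx
      exact ⟨b, rest, by simp [ha, hd], hb⟩

theorem pvTakeDrop (l pr r : List String) (h : pr ++ r = l) :
    l.take pr.length = pr ∧ l.drop pr.length = r := by
  subst h
  exact ⟨List.take_left, List.drop_left⟩

-- ===== VERDICT (by name: the statement is the Claim_ definition above) =====
theorem parse_server_commands_spec : Claim_equal_parse_server_commands := by
  intro argv _dom
  unfold Spec_parse_server_commands
  rw [pvB_char]
  by_cases hany : argv.any pvIsSep = true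
  · -- a separator exists
    obtain ⟨a, rest, hd, ha⟩ := pvDropWhile_sep argv hany
    have hsplit : argv.takeWhile (fun b => !pvIsSep b) ++ a :: rest = argv := by
      rw [← hd]; exact List.takeWhile_append_dropWhile
    have hprens : ∀ b ∈ argv.takeWhile (fun b => !pvIsSep b), pvIsSep b = false := by
      intro b hb
      have := List.mem_takeWhile_imp hb
      simpa using this
    have hcontains : ¬ (¬ argv.contains "--" ∧ ¬ argv.contains "---") := by
      rcases pvIsSep_elim ha with rfl | rfl
      · intro hcon; exact hcon.1 (by rw [← hsplit]; simp)
      · intro hcon; exact hcon.2 (by rw [← hsplit]; simp)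
    have hb : (a == "--" || a == "---") = true := by
      rcases pvIsSep_elim ha with rfl | rfl <;> simp
    have hGargv : pvG argv = (argv.takeWhile (fun b => !pvIsSep b), pvTagged (a == "---") [] rest) := by
      conv_lhs => rw [← hsplit]
      rw [pvG_append_nonsep _ _ hprens]
      rcases pvIsSep_elim ha with rfl | rfl <;> simp [pvG, pvIsSep, pvTagged]
    obtain ⟨htk, hdr⟩ := pvTakeDrop argv (argv.takeWhile (fun b => !pvIsSep b)) (a :: rest) hsplit
    have htake : PySem.List.slice argv none
        (some (0 + ((argv.takeWhile (fun b => !pvIsSep b)).length : Int)))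
        = argv.takeWhile (fun b => !pvIsSep b) := by
      rw [zero_add, PySem.List.slice_to_natCast, htk]
    have hdrop : PySem.List.slice argv
        (some (0 + ((argv.takeWhile (fun b => !pvIsSep b)).length : Int))) none
        = a :: rest := by
      rw [zero_add, PySem.List.slice_from_natCast, hdr]
    unfold parse_server_commands
    rw [if_neg hcontains, pvFind_some argv hany 0]
    dsimp only []
    rw [htake, hdrop]
    have hstep1 : (a :: rest).foldl pvStepA ([], [], [], false)
        = rest.foldl pvStepA ([], [], [], (a == "---")) := by
      simp [List.foldl_cons, pvStepA, hb]
    rw [hstep1]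
    have hfold := pvFoldA rest [] [] [] (a == "---")
    rcases hfe : rest.foldl pvStepA ([], [], [], (a == "---")) with ⟨sc, rc, cur, rel⟩
    rw [hfe] at hfold
    dsimp only []
    have hfin : (if cur ≠ [] then (if rel = true then (sc, rc ++ [cur]) else (sc ++ [cur], rc))
        else (sc, rc)) = pvFinish (sc, rc, cur, rel) := rfl
    rw [hfin, hfold]
    simp [hGargv]
  · -- no separator at all
    have hns : ∀ b ∈ argv, pvIsSep b = false := by
      intro b hb
      by_contra hcon
      exact hany (List.any_eq_true.mpr ⟨b, hb, by simpa using hcon⟩)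
    have h1 : "--" ∉ argv := by
      intro hm; have := hns _ hm; simp [pvIsSep] at this
    have h2 : "---" ∉ argv := by
      intro hm; have := hns _ hm; simp [pvIsSep] at this
    unfold parse_server_commands
    rw [if_pos (by simp [h1, h2])]
    simp [pvG_nonsep argv hns, pvSel]
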